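-- pv_equiv track=rewrite | github.com/konstdimasik/hyper_python | hangman.py | make_hint
-- ===== SOURCE A (Python) =====
-- def make_hint(hidden_word, guessed_letters):
--     hint = ""
--     for i in range(len(hidden_word)):
--         if hidden_word[i] in guessed_letters:
--             hint += hidden_word[i]
--         else:
--             hint += "-"
--     return hint
-- ===== SOURCE B (Python) =====
-- def make_hint(hidden_word, guessed_letters):
--     result = list('-' * len(hidden_word))
--     for letter in dict.fromkeys(guessed_letters):
--         for i, c in enumerate(hidden_word):
--             if c == letter:
--                 result[i] = c
--     return ''.join(result)
-- ===== Notes on version B (the rewrite author's own statement) =====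
-- stated objective: alternative
-- what changed: Instead of scanning word positions and testing substring membership of each character in the guesses, B allocates a dash buffer and runs the distinct guessed letters (dict.fromkeys) as the outer loop, overwriting every matching position for each letter.
import Mathlib
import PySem

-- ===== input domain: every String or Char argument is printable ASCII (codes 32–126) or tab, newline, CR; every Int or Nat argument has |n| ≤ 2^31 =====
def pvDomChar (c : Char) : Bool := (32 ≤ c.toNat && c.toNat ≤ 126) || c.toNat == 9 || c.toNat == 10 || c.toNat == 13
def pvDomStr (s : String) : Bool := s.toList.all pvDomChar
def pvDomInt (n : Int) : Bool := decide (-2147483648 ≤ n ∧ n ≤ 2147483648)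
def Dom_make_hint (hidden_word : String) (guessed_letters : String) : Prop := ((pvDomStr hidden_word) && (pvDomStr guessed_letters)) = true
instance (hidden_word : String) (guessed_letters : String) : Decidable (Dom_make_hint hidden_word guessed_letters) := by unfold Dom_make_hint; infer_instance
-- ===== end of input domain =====

-- B replaces A's position-scan-with-membership-test by an outer loop over the guesses filling a
-- dash buffer (objective: alternative decomposition; same asymptotic cost).

-- ===== PORT A =====
-- A: hint = ""; for i in range(len(hidden_word)): hint += hidden_word[i] if hidden_word[i] in guessed_letters else "-"
def make_hint (hidden_word : String) (guessed_letters : String) : String :=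
  String.mk
    ((PySem.List.pyRange 0 (PySem.Str.len hidden_word)).foldl
      (fun hint i =>
        match PySem.Chars.pyGet? hidden_word.toList i with
        | some c =>
            if PySem.Chars.isIn [c] guessed_letters.toList then hint ++ [c] else hint ++ ['-']
        | none => hint)   -- unreachable: i is always in range
      [])

-- ===== PORT B =====
-- B: result = list('-' * len); for letter in dict.fromkeys(guesses): for i, c in enumerate(word): if c == letter: result[i] = c
def make_hint_alt (hidden_word : String) (guessed_letters : String) : String :=
  String.mk
    ((PySem.List.dedup guessed_letters.toList).foldl
      (fun res letter =>
        (PySem.List.enumerate hidden_word.toList).foldl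
          (fun res ic =>
            if ic.2 == letter then (PySem.List.pySet? res ic.1 ic.2).getD res else res)
          res)
      (List.replicate hidden_word.toList.length '-'))

-- ===== PRECONDITION & SPEC =====
def Spec_make_hint (hidden_word : String) (guessed_letters : String) (out : String) : Prop := out = make_hint_alt hidden_word guessed_letters
instance (hidden_word : String) (guessed_letters : String) (out : String) : Decidable (Spec_make_hint hidden_word guessed_letters out) := by unfold Spec_make_hint; infer_instance

-- ===== CLAIM (what is proved, stated in full; the proofs are below) =====
def Claim_equal_make_hint : Prop := ∀ (hidden_word : String) (guessed_letters : String), Dom_make_hint hidden_word guessed_letters → Spec_make_hint hidden_word guessed_letters (make_hint hidden_word guessed_letters)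

-- ===== LEMMAS AND PROOFS =====

-- in-range indexing returns exactly the default-free element
lemma pv_pyGet?_eq_some (l : List Char) (i : Int) (h0 : 0 ≤ i) (h : i < (l.length : Int)) :
    PySem.Chars.pyGet? l i = some (PySem.List.pyGetD l i '-') := by
  have hn : i.toNat < l.length := by omega
  simp [PySem.Chars.pyGet?, PySem.List.pyGet?, PySem.List.pyIdx?, h0, h,
    PySem.List.pyGetD_of_nonneg _ _ h0, List.getD_eq_getElem?_getD]

-- single-character 'in' on strings is list membership
lemma pv_isIn_singleton (c : Char) (g : List Char) :
    PySem.Chars.isIn [c] g = g.contains c := by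
  rw [show g.contains c = decide (c ∈ g) by simp]
  rcases h : PySem.Chars.isIn [c] g with _ | _
  · have hni : ¬ c ∈ g := fun m => by
      have := (PySem.Chars.isIn_iff_infix [c] g).mpr ((List.singleton_infix_iff c g).mpr m)
      rw [h] at this; cases this
    simp [hni]
  · have := (PySem.Chars.isIn_iff_infix [c] g).mp h
    simp [(List.singleton_infix_iff c g).mp this]

-- A's index loop is the pointwise map over the characters
lemma pvA_char (l g : List Char) :
    ((PySem.List.pyRange 0 (PySem.List.len l)).foldl
      (fun hint i =>
        match PySem.Chars.pyGet? l i with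
        | some c => if PySem.Chars.isIn [c] g then hint ++ [c] else hint ++ ['-']
        | none => hint) [])
    = l.map (fun c => if PySem.Chars.isIn [c] g then c else '-') := by
  have hcong : ∀ (acc : List Char), ∀ i ∈ PySem.List.pyRange 0 (PySem.List.len l),
      (match PySem.Chars.pyGet? l i with
       | some c => if PySem.Chars.isIn [c] g then acc ++ [c] else acc ++ ['-']
       | none => acc)
      = acc ++ [(fun c => if PySem.Chars.isIn [c] g then c else '-') (PySem.List.pyGetD l i '-')] := by
    intro acc i hi
    have hb := PySem.List.mem_pyRange_one.mp hi
    rw [pv_pyGet?_eq_some l i hb.1 (by simpa [PySem.List.len] using hb.2)]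
    by_cases hc : PySem.Chars.isIn [PySem.List.pyGetD l i '-'] g = true <;> simp [hc]
  rw [PySem.List.foldl_congr_mem _ _ _ _ hcong,
    PySem.List.foldl_append_singleton_eq_map
      (f := fun i => (fun c => if PySem.Chars.isIn [c] g then c else '-') (PySem.List.pyGetD l i '-'))]
  rw [show (fun i => (fun c => if PySem.Chars.isIn [c] g then c else '-') (PySem.List.pyGetD l i '-'))
        = (fun c => if PySem.Chars.isIn [c] g then c else '-') ∘ (fun j => PySem.List.pyGetD l j '-')
      from rfl]
  rw [← List.map_map, PySem.List.map_pyGetD_pyRange_zero]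
  simp

-- zipping a list against a pointwise image of itself is a map
lemma pv_zipWith_self_map (f : Char → Char → Char) (h : Char → Char) :
    ∀ (l : List Char), List.zipWith f l (l.map h) = l.map (fun c => f c (h c)) := by
  intro l; induction l with
  | nil => rfl
  | cons x t ih => simp [ih]

-- B's inner loop merges one letter into the buffer, position by position
lemma pvB_inner (letter : Char) (l : List Char) :
    ∀ (a b : List Char), b.length = l.length →
    ((PySem.List.enumerate l (a.length : Int)).foldl
      (fun res ic => if ic.2 == letter then (PySem.List.pySet? res ic.1 ic.2).getD res else res)
      (a ++ b))
    = a ++ List.zipWith (fun c d => if c == letter then c else d) l b := by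
  induction l with
  | nil =>
      intro a b hb
      have : b = [] := List.length_eq_zero_iff.mp (by simpa using hb)
      simp [this, PySem.List.enumerate]
  | cons x t ih =>
      intro a b hb
      cases b with
      | nil => simp at hb
      | cons d b' =>
          have hset : PySem.List.pySet? (a ++ d :: b') (a.length : Int) x = some (a ++ x :: b') := by
            simp [PySem.List.pySet?, PySem.List.pyIdx?]
          rw [show PySem.List.enumerate (x :: t) (a.length : Int)
                = ((a.length : Int), x) :: PySem.List.enumerate t ((a.length : Int) + 1) from by
              simp [PySem.List.enumerate]]
          rw [List.foldl_cons]
          have hstep :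
              (if ((((a.length : Int), x)).2 == letter) = true
                then (PySem.List.pySet? (a ++ d :: b') (((a.length : Int), x)).1 (((a.length : Int), x)).2).getD (a ++ d :: b')
                else (a ++ d :: b'))
              = a ++ (if (x == letter) = true then x else d) :: b' := by
            by_cases hx : (x == letter) = true <;> simp [hx, hset]
          rw [hstep]
          have h1 : (((a ++ [if (x == letter) = true then x else d]).length : Int)) = (a.length : Int) + 1 := by simp
          have := ih (a ++ [if (x == letter) = true then x else d]) b' (by simpa using hb)
          rw [h1] at this
          by_cases hx : (x == letter) = true
          · have he : x = letter := by simpa using hx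
            simpa [he] using this
          · have he : ¬ x = letter := by simpa using hx
            simpa [he] using this

-- B's outer loop keeps the buffer a pointwise map of the word
lemma pvB_outer (l : List Char) :
    ∀ (g : List Char) (q : Char → Bool),
    (g.foldl
      (fun res letter =>
        (PySem.List.enumerate l).foldl
          (fun res ic => if ic.2 == letter then (PySem.List.pySet? res ic.1 ic.2).getD res else res)
          res)
      (l.map (fun c => if q c then c else '-')))
    = l.map (fun c => if q c || g.contains c then c else '-') := by
  intro g
  induction g with
  | nil => intro q; simp
  | cons letter g' ih =>
      intro q
      rw [List.foldl_cons]
      have h1 : ((PySem.List.enumerate l).foldl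
          (fun res ic => if ic.2 == letter then (PySem.List.pySet? res ic.1 ic.2).getD res else res)
          (l.map (fun c => if q c then c else '-')))
          = l.map (fun c => if q c || (c == letter) then c else '-') := by
        have := pvB_inner letter l [] (l.map (fun c => if q c then c else '-')) (by simp)
        simp only [List.nil_append, List.length_nil, Nat.cast_zero] at this
        rw [this, pv_zipWith_self_map]
        apply List.map_congr_left
        intro c _
        by_cases hx : (c == letter) = true
        · simp [hx]
        · simp [hx]
      rw [h1, ih (fun c => q c || (c == letter))]
      apply List.map_congr_left
      intro c _
      have hcond : (q c || (c == letter) || g'.contains c) = (q c || (letter :: g').contains c) := by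
        by_cases hc : c = letter
        · subst hc; simp
        · rw [show (c == letter) = false from beq_eq_false_iff_ne.mpr hc]
          simp [hc]
      rw [hcond]

-- ===== VERDICT (by name: the statement is the Claim_ definition above) =====
theorem make_hint_spec : Claim_equal_make_hint := by
  intro hidden_word guessed_letters _
  unfold Spec_make_hint make_hint make_hint_alt
  congr 1
  rw [PySem.Str.len_eq hidden_word,
    show ((hidden_word.toList.length : Int)) = PySem.List.len hidden_word.toList from rfl,
    pvA_char hidden_word.toList guessed_letters.toList,
    show List.replicate hidden_word.toList.length '-'
        = hidden_word.toList.map (fun c => if (fun _ => false) c then c else '-') from by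
      simp [List.map_const'],
    pvB_outer hidden_word.toList (PySem.List.dedup guessed_letters.toList) (fun _ => false)]
  apply List.map_congr_left
  intro c _
  simp [pv_isIn_singleton]
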